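-- pv_equiv track=rewrite | github.com/AWestover/3dGames | land-help/pwd/breakHash.py | allCombos
-- ===== SOURCE A (Python) =====
-- def allCombos(arr, length):
--     combos = [[]]
--     for i in range(0, length):
--       tmp = []
--       for el in arr:
--         tmp += [ combo + [el] for combo in combos ]
--       combos = tmp
--     return combos
-- ===== SOURCE B (Python) =====
-- def allCombos(arr, length):
--     n = len(arr)
--     res = []
--     for i in range(n ** length):
--         combo = []
--         x = i
--         for _ in range(length):
--             combo.append(arr[x % n])
--             x //= n
--         res.append(combo)
--     return res
-- ===== Notes on version B (the rewrite author's own statement) =====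
-- stated objective: alternative
-- what changed: Instead of rebuilding the whole combo list length times (appending each element to every existing combo), B enumerates indices 0..n**length-1 and decodes each index into its combo by mixed-radix digits (position 0 = i % n varies fastest, matching A's order).
-- outside the precondition, e.g. on allCombos(['a'], -1): A returns [[]], B raises TypeError; on allCombos([], -1): A returns [[]], B raises ZeroDivisionError
import Mathlib
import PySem

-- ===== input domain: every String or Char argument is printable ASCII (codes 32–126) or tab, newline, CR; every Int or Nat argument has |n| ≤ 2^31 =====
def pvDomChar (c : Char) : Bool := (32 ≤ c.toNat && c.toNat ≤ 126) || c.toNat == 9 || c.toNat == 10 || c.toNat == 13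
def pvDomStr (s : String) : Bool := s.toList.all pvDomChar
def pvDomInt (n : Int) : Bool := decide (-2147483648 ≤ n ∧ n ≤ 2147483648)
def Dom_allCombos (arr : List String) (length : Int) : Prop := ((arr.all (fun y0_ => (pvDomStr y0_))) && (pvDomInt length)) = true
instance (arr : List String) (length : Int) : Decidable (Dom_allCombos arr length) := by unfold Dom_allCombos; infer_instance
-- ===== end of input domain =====

-- B enumerates indices 0..n^length-1 and decodes each into a combo by mixed-radix digits
-- (position 0 varies fastest, matching A's order), instead of A's repeated list rebuilding; objective: alternative.

-- ===== PORT A =====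
def allCombos (arr : List String) (length : Int) : List (List String) :=
  (PySem.List.pyRange 0 length 1).foldl
    (fun combos _ =>
      arr.foldl (fun tmp el => tmp ++ combos.map (fun combo => combo ++ [el])) [])
    [[]]

-- ===== PORT B =====
-- Source B's inner 'for _ in range(length): combo.append(arr[x % n]); x //= n', fuel = length.toNat
-- (exact for 0 ≤ length, which Pre_ guarantees); the index x % n is always in range when the
-- loop body is reached, so the .getD "" default is never used.
def decodeLoop (arr : List String) (n : Int) : Nat → List String → Int → List String
  | 0, combo, _ => combo
  | k+1, combo, x =>
      decodeLoop arr n k (combo ++ [(PySem.List.pyGet? arr (PySem.Int.mod x n)).getD ""])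
        (PySem.Int.floordiv x n)

def allCombos_alt (arr : List String) (length : Int) : List (List String) :=
  (PySem.List.pyRange 0 ((arr.length : Int) ^ length.toNat) 1).foldl
    (fun res i => res ++ [decodeLoop arr (arr.length : Int) length.toNat [] i]) []

-- ===== PRECONDITION & SPEC =====
-- Pre_ excludes negative length: A returns [[]] there, but B's n ** length is a non-integer
-- float power on which range() raises (TypeError; ZeroDivisionError for empty arr), so B cannot return.
def Pre_allCombos (arr : List String) (length : Int) : Prop := 0 ≤ length
instance (arr : List String) (length : Int) : Decidable (Pre_allCombos arr length) := by unfold Pre_allCombos; infer_instance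
def pvWitness_allCombos : List String × Int := (["a", "b"], 2)

def Spec_allCombos (arr : List String) (length : Int) (out : List (List String)) : Prop := out = allCombos_alt arr length
instance (arr : List String) (length : Int) (out : List (List String)) : Decidable (Spec_allCombos arr length out) := by unfold Spec_allCombos; infer_instance

-- ===== CLAIM (what is proved, stated in full; the proofs are below) =====
def Claim_equal_allCombos : Prop := ∀ (arr : List String) (length : Int), Dom_allCombos arr length → Pre_allCombos arr length → Spec_allCombos arr length (allCombos arr length)

-- ===== LEMMAS AND PROOFS =====

-- mathematical form of B's decoded combo at Nat index i
def dec (arr : List String) : Nat → Nat → List String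
  | 0, _ => []
  | k+1, i => arr.getD (i % arr.length) "" :: dec arr k (i / arr.length)

-- decodeLoop with accumulator = combo ++ dec (for positive n, Nat arguments)
theorem decodeLoop_eq_dec (arr : List String) (hn : 0 < arr.length) :
    ∀ (k : Nat) (combo : List String) (x : Nat),
      decodeLoop arr (arr.length : Int) k combo (x : Int) = combo ++ dec arr k x := by
  intro k
  induction k with
  | zero => intro combo x; simp [decodeLoop, dec]
  | succ k ih =>
      intro combo x
      have hmod : PySem.Int.mod (x : Int) (arr.length : Int) = ((x % arr.length : Nat) : Int) :=
        PySem.Int.mod_natCast x arr.length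
      have hdiv : PySem.Int.floordiv (x : Int) (arr.length : Int) = ((x / arr.length : Nat) : Int) :=
        PySem.Int.floordiv_natCast x arr.length
      have hlt : x % arr.length < arr.length := Nat.mod_lt _ hn
      simp only [decodeLoop, hmod, hdiv, PySem.List.pyGet?_natCast]
      rw [ih]
      simp [dec, List.getElem?_eq_getElem hlt, List.getD, List.append_assoc]

-- A's step as a flatMap
theorem astep_flatMap (arr : List String) (C : List (List String)) :
    arr.foldl (fun tmp el => tmp ++ C.map (fun combo => combo ++ [el])) [] =
      arr.flatMap (fun el => C.map (fun combo => combo ++ [el])) := by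
  simpa using PySem.List.foldl_append_eq_flatMap (fun el => C.map (fun combo => combo ++ [el])) arr []

-- A's iterated state
def aIter (arr : List String) : Nat → List (List String)
  | 0 => [[]]
  | k+1 => arr.flatMap (fun el => (aIter arr k).map (fun combo => combo ++ [el]))

theorem allCombos_eq_aIter (arr : List String) (L : Nat) :
    allCombos arr (L : Int) = aIter arr L := by
  induction L with
  | zero => simp [allCombos, aIter]
  | succ L ih =>
      unfold allCombos at *
      rw [show ((L + 1 : Nat) : Int) = (L : Int) + 1 by push_cast; ring,
          PySem.List.pyRange_one_succ_right (by positivity), List.foldl_append]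
      simp only [List.foldl_cons, List.foldl_nil]
      rw [ih, astep_flatMap]
      rfl

-- flatMap over a list = flatMap over its index range
theorem flatMap_eq_range {β : Type} (arr : List String) (f : String → List β) :
    arr.flatMap f = (List.range arr.length).flatMap (fun j => f (arr.getD j "")) := by
  induction arr with
  | nil => simp
  | cons a arr ih =>
      simp only [List.flatMap_cons, List.length_cons, List.range_succ_eq_map,
        List.flatMap_cons, List.flatMap_map]
      simpa [List.getD] using ih

-- range (b*a) split into b blocks of a
theorem range_mul_flatMap (a b : Nat) :
    List.range (b * a) = (List.range b).flatMap (fun j => (List.range a).map (fun r => j * a + r)) := by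
  induction b with
  | zero => simp
  | succ b ih =>
      rw [Nat.succ_mul, List.range_add, ih, List.range_succ, List.flatMap_append]
      simp

-- mixed-radix identity: decoding j*n^k + r appends arr[j] after decoding r
theorem dec_block (arr : List String) (hn : 0 < arr.length) :
    ∀ (k j r : Nat), j < arr.length → r < arr.length ^ k →
      dec arr (k+1) (j * arr.length ^ k + r) = dec arr k r ++ [arr.getD j ""] := by
  intro k
  induction k with
  | zero =>
      intro j r hj hr
      have hr0 : r = 0 := by simpa using hr
      subst hr0
      simp [dec, Nat.mod_eq_of_lt hj]
  | succ k ih =>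
      intro j r hj hr
      set n := arr.length with hn'
      have hmod : (j * n ^ (k+1) + r) % n = r % n := by
        rw [pow_succ, ← mul_assoc, Nat.add_comm, Nat.add_mul_mod_self_right]
      have hdiv : (j * n ^ (k+1) + r) / n = j * n ^ k + r / n := by
        rw [pow_succ, ← mul_assoc, Nat.add_comm, Nat.add_mul_div_right _ _ hn, Nat.add_comm]
      have hrdiv : r / n < n ^ k := by
        rw [Nat.div_lt_iff_lt_mul hn, ← pow_succ]; exact hr
      show dec arr (k+2) (j * n ^ (k+1) + r) = dec arr (k+1) r ++ [arr.getD j ""]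
      rw [show dec arr (k+2) (j * n ^ (k+1) + r) =
            arr.getD ((j * n ^ (k+1) + r) % n) "" :: dec arr (k+1) ((j * n ^ (k+1) + r) / n) from rfl,
          hmod, hdiv, ih j (r / n) hj hrdiv]
      rfl

-- A's state after k steps is the list of all decoded combos
theorem aIter_eq_map_dec (arr : List String) (k : Nat) :
    aIter arr k = (List.range (arr.length ^ k)).map (dec arr k) := by
  induction k with
  | zero => simp [aIter, dec]
  | succ k ih =>
      rcases Nat.eq_zero_or_pos arr.length with h0 | hn
      · have : arr = [] := List.length_eq_zero_iff.mp h0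
        subst this
        simp [aIter, pow_succ]
      · rw [show aIter arr (k+1) = arr.flatMap (fun el => (aIter arr k).map (fun c => c ++ [el])) from rfl,
            ih, flatMap_eq_range, pow_succ, mul_comm (arr.length ^ k) arr.length,
            range_mul_flatMap (arr.length ^ k) arr.length, List.map_flatMap]
        rw [List.flatMap_def, List.flatMap_def]
        apply congrArg List.flatten
        apply List.map_congr_left
        intro j hj
        simp only [List.map_map]
        apply List.map_congr_left
        intro r hr
        simp only [Function.comp]
        exact (dec_block arr hn k j r (List.mem_range.mp hj) (List.mem_range.mp hr)).symm

theorem allCombosAlt_eq_map_dec (arr : List String) (L : Nat) :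
    allCombos_alt arr (L : Int) = (List.range (arr.length ^ L)).map (dec arr L) := by
  unfold allCombos_alt
  rw [show ((L : Int)).toNat = L from Int.toNat_natCast L,
      show ((arr.length : Int)) ^ L = ((arr.length ^ L : Nat) : Int) by push_cast; ring,
      PySem.List.pyRange_zero_natCast,
      PySem.List.foldl_append_singleton_eq_map (fun i => decodeLoop arr (arr.length : Int) L [] i),
      List.map_map]
  simp only [List.nil_append]
  apply List.map_congr_left
  intro i hi
  rcases Nat.eq_zero_or_pos arr.length with h0 | hn
  · cases L with
    | zero => simp [decodeLoop, dec]
    | succ L => simp [h0] at hi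
  · simpa using decodeLoop_eq_dec arr hn L [] i

-- ===== VERDICT (by name: the statement is the Claim_ definition above) =====
theorem allCombos_spec : Claim_equal_allCombos := by
  intro arr length _ hpre
  have hL : length = ((length.toNat : Nat) : Int) := (Int.toNat_of_nonneg hpre).symm
  rw [Spec_allCombos, hL, allCombos_eq_aIter, aIter_eq_map_dec, allCombosAlt_eq_map_dec]
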